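/- GENERATED by mk_final_copies.py from the proof of the farm's unit `start_decoder.R7b` (farm:start_decoder.R7b.1: Lemmas.lean) as the
   re-elaboration sweep compiled it — do not edit. -/
import Asan.CheckWalk
import Vorbis.Spec.Units.start_decoder_R7b
import Vorbis.Spec.StartDecoderR7

open X86 X86.User Asan Vorbis Vorbis.Spec Vorbis.Spec.StartDecoder

set_option maxRecDepth 4000
set_option maxHeartbeats 4000000

namespace Vorbis.Spec.start_decoder_R7b

/-- **Where record `i` and the slot `classdata[j]` are**, as arithmetic for the walker: both above the text, in the data space, off the
stack region; the slot lies inside the `classdata` table and is apart from the record (two different blocks of the arena: their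
ages, `Since.ne_old`). -/
theorem row_geo {u₀ : State} {g : Ghost} {i j E : Nat} {A6 A6c Ai Ak Ad : Arena} {A A' : Arena × List Obj} {v : State}
    (hb : BodyR7Row u₀ g i j E A6 A6c Ai Ak Ad A A' v) :
    (0x119d40 ≤ resAt g v.mem i ∧ resAt g v.mem i + 32 ≤ 0xC00000 ∧
      (resAt g v.mem i + 32 ≤ 0x700000 ∨ 0x800000 ≤ resAt g v.mem i)) ∧
    (0x119d40 ≤ Residue.classdata v.mem (resAt g v.mem i) ∧
      Residue.classdata v.mem (resAt g v.mem i) + 8 * E ≤ 0xC00000 ∧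
      (Residue.classdata v.mem (resAt g v.mem i) + 8 * E ≤ 0x700000 ∨
        0x800000 ≤ Residue.classdata v.mem (resAt g v.mem i))) ∧
    (Residue.classdata v.mem (resAt g v.mem i) + 8 * E ≤ resAt g v.mem i ∨
      resAt g v.mem i + 32 ≤ Residue.classdata v.mem (resAt g v.mem i)) := by
  have hloop := hb.loop
  have hres := hloop.res
  have hcur := hb.cur
  have hlt := hcur.lt
  have h1 := hres.R1
  have harena := hloop.mid.arena
  have hp : Pos g A' := Pos.of_mid hloop.frame hloop.hand hloop.mid
  have p5 := hp.ar_stack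
  have p6 := hp.ar_hi
  have ht := hloop.hand.arenaText
  have e : L.textHi = 0x119d40 := rfl
  have hext := hb.alloc.ext
  have hAdA' : Ad.Extends A'.1 := hb.extd'.trans hext
  -- the `classdata` table
  have hcd := hcur.R8a (by omega)
  rw [hb.e_eq] at hcd
  have hcdA' := hcd.1.mono hAdA'
  have hcdIn := arena_inside harena hcdA'
  simp only [] at hcdIn
  -- the `residue_config` block: a block of `Ak`
  have hcfgK : Ak.Blk ⟨stb_vorbis.residue_config v.mem g.f,
      Off.sizeof.Residue * (stb_vorbis.residue_count v.mem g.f).toNat⟩ := (hres.R2.1.mono hres.ext6c).mono hb.extk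
  have hcfgA' := (hcfgK.mono hb.extd).mono hAdA'
  have hcfgIn := arena_inside harena hcfgA'
  simp only [] at hcfgIn
  have hd := arena_disjoint harena hcfgA' hcdA' (Since.ne_old hcfgK hcd)
  simp only [vblock] at hd
  have hr1 : stb_vorbis.residue_config v.mem g.f ≤ resAt g v.mem i := by
    simp only [resAt, vacc, voff]
    omega
  have hr2 : resAt g v.mem i + 32 ≤ stb_vorbis.residue_config v.mem g.f +
      Off.sizeof.Residue * (stb_vorbis.residue_count v.mem g.f).toNat := by
    simp only [resAt, vacc, voff] at h1 hlt ⊢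
    omega
  refine ⟨⟨?_, ?_, ?_⟩, ⟨?_, ?_, ?_⟩, ?_⟩
  all_goals omega

/-- **A check site inside record `i`** (`r + 16`, the `classdata` field): the record lies inside the live block `residue_config`. -/
theorem row_check_r {u₀ : State} {g : Ghost} {i j E : Nat} {A6 A6c Ai Ak Ad : Arena} {A A' : Arena × List Obj} {v : State}
    (hb : BodyR7Row u₀ g i j E A6 A6c Ai Ak Ad A A' v) {mem' : Mem} (hun : ShadowUntouched v.mem mem') (b : Word)
    (off k : Nat) (hbn : b.toNat = resAt g v.mem i + off) (hk : 1 ≤ k) (hoff : off + k ≤ 32) : AccSmall k mem' b := by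
  have hloop := hb.loop
  have hres := hloop.res
  have h1 := hres.R1
  have hlt := hb.cur.lt
  have hB : A'.1.Blk ⟨stb_vorbis.residue_config v.mem g.f,
      Off.sizeof.Residue * (stb_vorbis.residue_count v.mem g.f).toNat⟩ := (hres.R2.1.mono hres.ext6c).mono hres.exti
  have hr1 : stb_vorbis.residue_config v.mem g.f ≤ resAt g v.mem i := by
    simp only [resAt, vacc, voff]
    omega
  have hr2 : resAt g v.mem i + 32 ≤ stb_vorbis.residue_config v.mem g.f +
      Off.sizeof.Residue * (stb_vorbis.residue_count v.mem g.f).toNat := by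
    simp only [resAt, vacc, voff] at h1 hlt ⊢
    omega
  have hl : LiveIn A'.2 g.frames' _ _ := liveIn_of_arenaBlk hloop.mid.arena hB
  apply hl.accSmall hloop.frame.shadow hun b k hk
  · simp only []
    omega
  · simp only []
    omega

/-- **A check site at the slot `classdata[j]`** (`classdata + 8j`, 8 bytes): inside the live block `classdata` of `8·E` bytes,
`j < E`. -/
theorem row_check_cd {u₀ : State} {g : Ghost} {i j E : Nat} {A6 A6c Ai Ak Ad : Arena} {A A' : Arena × List Obj} {v : State}
    (hb : BodyR7Row u₀ g i j E A6 A6c Ai Ak Ad A A' v) {mem' : Mem} (hun : ShadowUntouched v.mem mem') (b : Word)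
    (hbn : b.toNat = Residue.classdata v.mem (resAt g v.mem i) + 8 * j) : AccSmall 8 mem' b := by
  have hloop := hb.loop
  have hjE := hb.j_lt
  have hcd := hb.cur.R8a (by omega)
  rw [hb.e_eq] at hcd
  have hB := hcd.1.mono (hb.extd'.trans hb.alloc.ext)
  have hl : LiveIn A'.2 g.frames' _ _ := liveIn_of_arenaBlk hloop.mid.arena hB
  apply hl.accSmall hloop.frame.shadow hun b 8 (by decide)
  · simp only []
    omega
  · simp only []
    omega

/-- **THE NULL ROW: `error(f, VORBIS_outofmem)` AND THE EPILOGUE** — from the return of `setup_malloc(f, W)` to the epilogue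
0x113b22 with eax = 0, over ONE footprint whose windows are the stack below the frame (the pushes, `error`'s frame), the slot
`[R + 18H, R + 20H)` (the spilled pointer), the ONE qword `classdata[j]` and `f->error`. The loop's invariant is carried by
`ResLoop.carry_spill` (the `classdata` table is `Young Ai A'`), the record under construction by `ResCur.carry_obj` exactly as in
`R7.row_start`; SD.ERR then follows from RES(i), R7 of record `i` and `Block(classdata, 8·E)` (`ResidueUpTo.deinit`). -/
theorem row_fail {u₀ : State} {g : Ghost} {i j E : Nat} {A6 A6c Ai Ak Ad : Arena} {A A' : Arena × List Obj} {v w : State}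
    {ws : List Span} (hb : BodyR7Row u₀ g i j E A6 A6c Ai Ak Ad A A' v)
    (hs : Mem.SameExcept ws v.mem w.mem) (hun : ShadowUntouched v.mem w.mem)
    (hok : ∀ x, x ∈ ws → (g.R - 408 ≤ x.lo ∧ x.hi ≤ g.R + 8) ∨ (g.R + 0x18 ≤ x.lo ∧ x.hi ≤ g.R + 0x20) ∨
      (x.lo = Residue.classdata v.mem (resAt g v.mem i) + 8 * j ∧
        x.hi = Residue.classdata v.mem (resAt g v.mem i) + 8 * j + 8) ∨
      (g.f + 140 ≤ x.lo ∧ x.hi ≤ g.f + 144))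
    (hbits : Bits (g.Blk A') g.len w.mem g.f)
    (hrip : w.rip = pc_ERR) (hrsp : w.reg .rsp = addr g.R) (hcode : CodeOK u₀ w.mem) (hinv : abiInv w)
    (hrax : (w.reg .rax).toNat % 2 ^ 32 = 0) : AtERR u₀ g w := by
  have hloop := hb.loop
  have hres := hloop.res
  have hcur := hb.cur
  have hlt := hcur.lt
  have h1 := hres.R1
  have h64 : i < 64 := by omega
  have harena := hloop.mid.arena
  have hp : Pos g A' := Pos.of_mid hloop.frame hloop.hand hloop.mid
  have p1 := hp.r_eq
  have p2 := hp.ra_lo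
  have p3 := hp.ra_hi
  have p4 := hp.objOut
  have p5 := hp.ar_stack
  have p6 := hp.ar_hi
  have p7 := hp.f_stack
  have p8 := hp.f_hi
  have hext := hb.alloc.ext
  have hAdA' : Ad.Extends A'.1 := hb.extd'.trans hext
  have hjE : j < Residue.E v.mem g.f (resAt g v.mem i) := by
    rw [hb.e_eq]
    exact hb.j_lt
  -- the `classdata` table: allocated between `Ak` and `Ad`, inside the arena's buffer
  have hcd := hcur.R8a (by omega)
  have hcdA' := hcd.1.mono hAdA'
  have hcdAi := (hcd.older hb.extk).mono hAdA'
  have hcdIn := arena_inside harena hcdA'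
  simp only [] at hcdIn
  -- every window is a window of the residue loop's carry
  have hwin : ∀ x, x ∈ ws → ResWin g i (resAt g v.mem i) Ai A' x ∨ (g.R + 0x18 ≤ x.lo ∧ x.hi ≤ g.R + 0x20) := by
    intro x hx
    rcases hok x hx with q | q | q | q
    · exact Or.inl (Or.inl q)
    · exact Or.inr q
    · refine Or.inl (Or.inr (Or.inr (Or.inr (Or.inr (Or.inr (Or.inr (Or.inr (Or.inr (Or.inr (Or.inr (Or.inr ?_)))))))))))
      apply Young.of_since harena hres.exti hcdAi
      simp only []
      omega
    · exact Or.inl (Or.inr (Or.inr (Or.inr (Or.inr (Or.inl (by omega))))))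
  have hloop' := hloop.carry_spill (pc' := pc_ERR) hlt hs hun hwin hbits hrip hrsp hcode hinv
  -- a block of the arena other than the `classdata` table is kept
  have keptB : ∀ B : Block, A'.1.Blk B →
      B ≠ ⟨Residue.classdata v.mem (resAt g v.mem i), 8 * Residue.E v.mem g.f (resAt g v.mem i)⟩ → B.Kept v.mem w.mem := by
    intro B hB hneB
    have hin := arena_inside harena hB
    have hd := arena_disjoint harena hB hcdA' hneB
    simp only [vblock] at hd
    apply Block.Kept.of_sameExcept hs
    · intro x hx
      rcases hok x hx with q | q | q | q
      · omega
      · omega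
      · omega
      · omega
    · omega
  -- a block of the snapshot `Ak` is such a block
  have keptOld : ∀ B : Block, Ak.Blk B → B.Kept v.mem w.mem := by
    intro B hB
    exact keptB B ((hB.mono hb.extd).mono hAdA') (Since.ne_old hB hcd)
  -- the windows of `*f` that the record reads
  have he : ObjEq (Res.wins (i + 1)) v.mem g.f w.mem g.f := by
    apply ObjEq.of_sameExcept hs
    · intro x hx
      simp only [Res.wins, List.mem_cons, List.mem_nil_iff, or_false] at hx
      rcases hx with rfl | rfl | rfl
      all_goals simp only []
      all_goals omega
    · intro x hx y hy
      simp only [Res.wins, List.mem_cons, List.mem_nil_iff, or_false] at hx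
      rcases hok y hy with q | q | q | q
      all_goals rcases hx with rfl | rfl | rfl
      all_goals simp only []
      all_goals omega
  -- the record, the class book's header, `residue_books`
  have hconfK := keptOld _ ((hres.R2.1.mono hres.ext6c).mono hb.extk)
  have hrecK : (Block.mk (resAt g v.mem i) Off.sizeof.Residue).Kept v.mem w.mem := by
    apply hconfK.mono
    · simp only [resAt, vacc, voff]
      omega
    · simp only [resAt, vacc, voff] at h1 hlt ⊢
      omega
  have hcbK : (codebooksBlock v.mem g.f).Kept v.mem w.mem :=
    keptOld _ (((((hloop.mid.own.cb0 (by omega)).ok (hloop.mid.own.nonnull (by omega))).F2.mono hres.ext6).mono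
      hres.ext6c).mono hb.extk)
  have h7 := hcur.R7
  have hcbkK : (Block.mk (Residue.cbk v.mem g.f (resAt g v.mem i)) 8).Kept v.mem w.mem := by
    apply hcbK.mono
    · simp only [vacc, voff]
      omega
    · simp only [vacc, voff] at h7 ⊢
      omega
  have hbooksK := keptOld _ (hcur.R8 (by omega)).1
  -- the record under construction in the new memory
  have hcur' : ResCur g (Since Ai Ak) (Since Ak Ad) w.mem i 7 :=
    hcur.carry_obj he h64 hrecK hcbkK (fun _ => hbooksK) (fun _ hB => hB) (fun _ hB => hB)
  -- SD.ERR: H2, H3 from RES(i) + R7 and `Block(classdata, 8·E)` of record `i`, H5 from the zero rest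
  have hd : ResidueDeinitOK A'.1.Blk w.mem g.f := by
    apply hloop'.res.upTo.deinit hloop'.zero (hloop'.mid.own.nonnull (by omega))
    intro _
    exact Or.inr ⟨hcur'.R7, (hcur'.R8a (by omega)).1.mono hAdA'⟩
  have h2 : H2 (g.Blk A') w.mem g.f := H2.mono (ResidueDeinitOK.h2 hd hloop'.res.R1.2) (fun _ hB => runBlk_setup hB)
  have h3 : H3 (g.Blk A') w.mem g.f := H3.mono (ResidueDeinitOK.h3 hd) (fun _ hB => runBlk_setup hB)
  have hfail : Failed g.len g.f (g.Live A') A' w.mem :=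
    hloop'.mid.failed (by omega) h2 h3 (hloop'.mid.h5_null (by omega) _)
  exact ⟨A', hloop'.frame, hloop'.hand, Or.inl ⟨hrax, hfail⟩⟩

/-- `lea r12d, [r15 − 1]` (0x115e84) with `r15 = W` gives the counter word of loop 4084 for `n = W`: `W − 1`, or `FFFFFFFFH` for
`W = 0`. -/
theorem kword_lea (W : Nat) (hW : W < 2 ^ 32) :
    Word.ofBV (BitVec.setWidth 32 (addr W - 1).toBitVec) = R7.kword W := by
  unfold R7.kword
  by_cases h0 : W = 0
  · subst h0
    rw [if_pos rfl]
    decide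
  · rw [if_neg h0]
    have e1 : addr W - 1 = addr (W - 1) := by
      have := addr_sub_addr W 1 (by omega)
      exact this
    rw [e1]
    apply UInt64.toNat_inj.mp
    rw [Vorbis.toNat_ofBV32, BitVec.toNat_setWidth, UInt64.toNat_toBitVec, toNat_addr _ (by omega)]
    omega


/-- `W = classwords` is a non-negative C `int`: below `2 ^ 32` (the premise of `kword_lea`). -/
theorem row_W_lt (mem : Mem) (f r : Nat) : Residue.W mem f r < 2 ^ 32 := by
  unfold Residue.W
  simp only [Codebook.dimensions]
  have h := (Mem.i32_range mem (Residue.cbk mem f r + Off.Codebook.dimensions)).2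
  omega

/-- The `classdata` table lies inside the arena's buffer (the arm of `bits_kept` for the store `classdata[j] = rax`). -/
theorem row_cd_inside {u₀ : State} {g : Ghost} {i j E : Nat} {A6 A6c Ai Ak Ad : Arena} {A A' : Arena × List Obj} {v : State}
    (hb : BodyR7Row u₀ g i j E A6 A6c Ai Ak Ad A A' v) :
    A'.1.B ≤ Residue.classdata v.mem (resAt g v.mem i) ∧
      Residue.classdata v.mem (resAt g v.mem i) + 8 * E ≤ A'.1.B + A'.1.L := by
  have hcd := hb.cur.R8a (by omega)
  rw [hb.e_eq] at hcd
  have hin := arena_inside hb.loop.mid.arena (hcd.1.mono (hb.extd'.trans hb.alloc.ext))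
  simp only [] at hin
  exact hin


end Vorbis.Spec.start_decoder_R7b
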